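-- pv_equiv track=rewrite | github.com/himitery/Algorithm | programmers/python/2024_KAKAO_WINTER_INTERNSHIP/도넛과_막대_그래프/main.py | solution
-- ===== SOURCE A (Python) =====
-- from collections import defaultdict, deque
-- from typing import List, Set, Dict, Tuple
--
-- def solution(edges: List[List[int]]) -> List[int]:
--     graph, in_degree, out_degree = defaultdict(lambda: list()), defaultdict(int), defaultdict(int)
--     nodes = set()
--
--     for src, dest in edges:
--         graph[src].append(dest)
--         in_degree[dest] += 1
--         out_degree[src] += 1
--         nodes |= {src, dest}
--
--     created_node, visited = find_start_node(nodes, in_degree, out_degree), set()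
--     donut_count, bar_count, eight_count = 0, 0, 0
--
--     for start in graph[created_node]:
--         if start not in visited:
--             donut, bar, eight = detect_graph(start, graph)
--             donut_count, bar_count, eight_count = donut_count + donut, bar_count + bar, eight_count + eight
--
--             visited.add(start)
--
--     return [created_node, donut_count, bar_count, eight_count]
--
-- def find_start_node(nodes: Set[int], in_degree: Dict[int, int], out_degree: Dict[int, int]) -> int:
--     start = 0
--     for node in nodes:
--         if out_degree[node] >= 2 and in_degree[node] == 0:
--             start = node
--             break
--
--     return start
--
-- def detect_graph(start: int, graph: Dict[int, List[int]]) -> Tuple[int, int, int]: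
--     queue, components, count = deque([start]), set(), 0
--
--     while queue:
--         node = queue.popleft()
--         if node in components:
--             continue
--
--         components.add(node)
--         for next_node in graph[node]:
--             count += 1
--             queue.append(next_node)
--
--     return (
--         int(count == len(components)),
--         int(count == len(components) - 1),
--         int(count not in [len(components), len(components) - 1]),
--     )
-- ===== SOURCE B (Python) =====
-- from collections import Counter
--
--
-- def solution(edges):
--     pairs = [(e[0], e[1]) for e in edges]
--     outdeg = Counter(s for s, _ in pairs)
--     indeg = Counter(d for _, d in pairs)
--     nodes = list(dict.fromkeys(n for p in pairs for n in p))
--     created = next((n for n in nodes if outdeg[n] >= 2 and indeg[n] == 0), 0)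
--
--     starts = list(dict.fromkeys(d for s, d in pairs if s == created))
--     donut = bar = eight = 0
--     for start in starts:
--         comp = closure(start, pairs)
--         cnt = sum(1 for s, _ in pairs if s in comp)
--         if cnt == len(comp):
--             donut += 1
--         elif cnt == len(comp) - 1:
--             bar += 1
--         else:
--             eight += 1
--
--     return [created, donut, bar, eight]
--
--
-- def closure(start, pairs):
--     # saturate {start} under the edge relation: repeated passes over the raw
--     # edge list until no new node is added (no adjacency structure needed)
--     comp = {start}
--     changed = True
--     while changed:
--         changed = False
--         for s, d in pairs:
--             if s in comp and d not in comp: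
--                 comp.add(d)
--                 changed = True
--     return comp
-- ===== Notes on version B (the rewrite author's own statement) =====
-- stated objective: alternative
-- what changed: B builds no adjacency structure and does no queue/stack traversal at all: each component's node set is computed by fixed-point saturation directly over the raw edge list (repeat full passes adding d whenever s is already in the set, until a pass adds nothing), its edge count is obtained by filtering the raw edge list for sources inside the set, degrees come from Counter, and the start list is deduplicated up front instead of a visited set. …
-- outside the precondition, e.g. on solution([[4, 5], [4, 6], [1, 2], [1, 3]]): A returns [1, 0, 2, 0], B returns [4, 0, 2, 0]
import Mathlib
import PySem

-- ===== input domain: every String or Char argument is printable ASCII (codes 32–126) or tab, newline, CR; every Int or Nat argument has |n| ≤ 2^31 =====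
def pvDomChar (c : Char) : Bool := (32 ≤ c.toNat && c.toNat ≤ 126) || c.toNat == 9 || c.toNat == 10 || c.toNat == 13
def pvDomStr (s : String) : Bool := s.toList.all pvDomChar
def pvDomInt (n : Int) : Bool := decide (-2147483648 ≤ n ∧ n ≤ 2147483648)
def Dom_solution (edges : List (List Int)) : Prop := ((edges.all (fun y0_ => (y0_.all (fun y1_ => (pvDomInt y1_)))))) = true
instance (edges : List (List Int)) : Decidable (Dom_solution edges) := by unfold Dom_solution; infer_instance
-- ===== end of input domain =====

-- B does no BFS/DFS traversal and builds no adjacency structure: each component is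
-- computed by fixed-point saturation over the raw edge list and its edge count by
-- filtering that list; proved equal to A on Pre_ (rows of length 2, at most one
-- candidate start node).


-- ===== PORT A =====

-- termination measure for A's worklist loop: total out-degree of the keys not yet visited
def pvPending (g : PySem.Dict Int (List Int)) (comp : PySem.Set Int) : Nat :=
  (((PySem.List.dedup (g.items.map (fun p => p.1))).filter
      (fun k => !(PySem.Set.contains comp k))).map
      (fun k => (g.getD k []).length)).sum

-- splitting the sum over a nodup list at one kept element (used by pvPending_add)
theorem pv_sum_filter_split (l : List Int) (a : Int) (p : Int → Bool) (f : Int → Nat)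
    (hl : l.Nodup) (ha : a ∈ l) (hp : p a = true) :
    ((l.filter p).map f).sum
      = f a + ((l.filter (fun x => p x && !(x == a))).map f).sum := by
  induction l with
  | nil => cases ha
  | cons x t ih =>
    rcases List.nodup_cons.mp hl with ⟨hxt, hnt⟩
    rcases List.mem_cons.mp ha with h | hat
    · subst h
      have h1 : t.filter (fun y => p y && !(y == a)) = t.filter p := by
        apply List.filter_congr
        intro y hy
        have hy' : (y == a) = false := by
          simp only [beq_eq_false_iff_ne]
          rintro rfl; exact hxt hy
        simp [hy']
      simp [hp]
      rw [h1]
    · have hxa : (x == a) = false := by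
        simp only [beq_eq_false_iff_ne]
        rintro rfl; exact hxt hat
      by_cases hpx : p x = true
      · simp [hpx, hxa, ih hnt hat]
        omega
      · have hpx' : p x = false := by revert hpx; cases p x <;> simp
        simp [hpx', ih hnt hat]

theorem pv_contains_add (s : PySem.Set Int) (a x : Int) :
    PySem.Set.contains (PySem.Set.add s a) x = (PySem.Set.contains s x || x == a) := by
  by_cases hs : x ∈ s
  · have c2 : PySem.Set.contains s x = true := (PySem.Set.contains_iff s x).mpr hs
    have c1 : PySem.Set.contains (PySem.Set.add s a) x = true :=
      (PySem.Set.contains_iff _ x).mpr ((PySem.Set.mem_add s a x).mpr (Or.inl hs))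
    rw [c1, c2]; rfl
  · by_cases hxa : x = a
    · have c1 : PySem.Set.contains (PySem.Set.add s a) x = true :=
        (PySem.Set.contains_iff _ x).mpr ((PySem.Set.mem_add s a x).mpr (Or.inr hxa))
      have c3 : (x == a) = true := beq_iff_eq.mpr hxa
      rw [c1, c3, Bool.or_true]
    · have c1 : PySem.Set.contains (PySem.Set.add s a) x = false := by
        cases hc : PySem.Set.contains (PySem.Set.add s a) x
        · rfl
        · rcases (PySem.Set.mem_add s a x).mp ((PySem.Set.contains_iff _ x).mp hc) with h | h
          · exact absurd h hs
          · exact absurd h hxa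
      have c2 : PySem.Set.contains s x = false := by
        cases hc : PySem.Set.contains s x
        · rfl
        · exact absurd ((PySem.Set.contains_iff s x).mp hc) hs
      have c3 : (x == a) = false := beq_eq_false_iff_ne.mpr hxa
      rw [c1, c2, c3]; rfl

-- the measure drops by at least the out-degree of a newly visited node
theorem pvPending_add (g : PySem.Dict Int (List Int)) (comp : PySem.Set Int) (node : Int)
    (h : node ∉ comp) :
    pvPending g (PySem.Set.add comp node) + (g.getD node []).length ≤ pvPending g comp := by
  unfold pvPending
  have hfilter :
      (PySem.List.dedup (g.items.map (fun p => p.1))).filter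
          (fun k => !(PySem.Set.contains (PySem.Set.add comp node) k))
        = (PySem.List.dedup (g.items.map (fun p => p.1))).filter
          (fun k => (!(PySem.Set.contains comp k)) && !(k == node)) := by
    apply List.filter_congr
    intro k _
    rw [pv_contains_add]
    cases PySem.Set.contains comp k <;> cases hk : (k == node) <;> simp
  rw [hfilter]
  by_cases hkey : node ∈ PySem.List.dedup (g.items.map (fun p => p.1))
  · have hnd : (PySem.List.dedup (g.items.map (fun p => p.1))).Nodup := by
      rw [PySem.List.dedup_eq_ofList]; exact PySem.Set.nodup_ofList _
    have hp : (!(PySem.Set.contains comp node)) = true := by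
      cases hc : PySem.Set.contains comp node
      · rfl
      · exact absurd ((PySem.Set.contains_iff comp node).mp hc) h
    have := pv_sum_filter_split (PySem.List.dedup (g.items.map (fun p => p.1))) node
      (fun k => !(PySem.Set.contains comp k)) (fun k => (g.getD k []).length) hnd hkey hp
    simp only [] at this
    omega
  · have hgd : (g.getD node []).length = 0 := by
      have hget : g.get? node = none := by
        cases hg : g.get? node with
        | none => rfl
        | some v =>
          exfalso
          apply hkey
          rw [PySem.List.dedup_eq_ofList]
          exact (PySem.Set.mem_ofList _ _).mpr
            (List.mem_map.mpr ⟨(node, v), PySem.Dict.mem_items_of_get?_eq_some g hg, rfl⟩)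
      simp [PySem.Dict.getD, hget]
    have hfeq :
        (PySem.List.dedup (g.items.map (fun p => p.1))).filter
            (fun k => (!(PySem.Set.contains comp k)) && !(k == node))
          = (PySem.List.dedup (g.items.map (fun p => p.1))).filter
            (fun k => !(PySem.Set.contains comp k)) := by
      apply List.filter_congr
      intro k hk
      have hk' : (k == node) = false := by
        simp only [beq_eq_false_iff_ne]
        rintro rfl; exact hkey hk
      simp [hk']
    rw [hfeq]
    omega

-- one fold pass building A's defaultdict graph, in/out degree dicts and node set
def pvBuildA (edges : List (List Int)) :
    PySem.Dict Int (List Int) × PySem.Dict Int Int × PySem.Dict Int Int × PySem.Set Int :=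
  edges.foldl
    (fun st e =>
      match e with
      | [src, dest] =>
        (st.1.modify src [] (fun l => l ++ [dest]),
         st.2.1.modify dest 0 (fun x => x + 1),
         st.2.2.1.modify src 0 (fun x => x + 1),
         PySem.Set.add (PySem.Set.add st.2.2.2 src) dest)
      | _ => st)  -- Python raises ValueError on such rows; excluded by Pre_solution
    (⟨[]⟩, ⟨[]⟩, ⟨[]⟩, PySem.Set.empty)

-- find_start_node: first node (insertion order) with out_degree >= 2 and in_degree == 0, else 0
def pvFindStartA (nodes : PySem.Set Int) (ind outd : PySem.Dict Int Int) : Int :=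
  (nodes.find? (fun node => decide (2 ≤ outd.getD node 0) && (ind.getD node 0 == 0))).getD 0

-- detect_graph's BFS loop: queue, components set, enqueue counter
def pvDetectA (g : PySem.Dict Int (List Int)) :
    List Int → PySem.Set Int → Int → PySem.Set Int × Int
  | [], comp, count => (comp, count)
  | node :: rest, comp, count =>
    if h : node ∈ comp then pvDetectA g rest comp count
    else pvDetectA g (rest ++ g.getD node []) (PySem.Set.add comp node)
           (count + ((g.getD node []).length : Int))
  termination_by queue comp _ => queue.length + pvPending g comp
  decreasing_by
  · simp only [List.length_cons]
    omega
  · have := pvPending_add g comp node h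
    simp only [List.length_append, List.length_cons]
    omega

def solution (edges : List (List Int)) : List Int :=
  let st := pvBuildA edges
  let created := pvFindStartA st.2.2.2 st.2.1 st.2.2.1
  let r := (st.1.getD created []).foldl
    (fun (acc : PySem.Set Int × Int × Int × Int) start =>
      if start ∈ acc.1 then acc
      else
        let dc := pvDetectA st.1 [start] PySem.Set.empty 0
        (PySem.Set.add acc.1 start,
         acc.2.1 + (if dc.2 = (dc.1.length : Int) then 1 else 0),
         acc.2.2.1 + (if dc.2 = (dc.1.length : Int) - 1 then 1 else 0),
         acc.2.2.2 + (if dc.2 ≠ (dc.1.length : Int) ∧ dc.2 ≠ (dc.1.length : Int) - 1 then 1 else 0)))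
    (PySem.Set.empty, 0, 0, 0)
  [created, r.2.1, r.2.2.1, r.2.2.2]

-- ===== PORT B =====

-- pairs = [(e[0], e[1]) for e in edges]; IndexError on short rows is excluded by Pre_solution
def pvPairs (edges : List (List Int)) : List (Int × Int) :=
  edges.map (fun e => (PySem.List.pyGetD e 0 0, PySem.List.pyGetD e 1 0))

-- one 'for s, d in pairs' pass of closure's while-loop: comp plus the changed flag
def pvPassF : PySem.Set Int × Bool → Int × Int → PySem.Set Int × Bool := fun st p =>
  if PySem.Set.contains st.1 p.1 && !(PySem.Set.contains st.1 p.2)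
  then (PySem.Set.add st.1 p.2, true) else st

def pvPass (pairs : List (Int × Int)) (comp : PySem.Set Int) : PySem.Set Int × Bool :=
  pairs.foldl pvPassF (comp, false)

-- termination measure for the saturation loop: destinations not yet in comp
def pvMeasure (pairs : List (Int × Int)) (comp : PySem.Set Int) : Nat :=
  ((PySem.List.dedup (pairs.map Prod.snd)).filter
      (fun d => !(PySem.Set.contains comp d))).length

-- a pass only grows comp
theorem pv_passF_subset (l : List (Int × Int)) (c : PySem.Set Int) (fl : Bool) (x : Int)
    (hx : x ∈ c) : x ∈ (l.foldl pvPassF (c, fl)).1 := by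
  induction l generalizing c fl with
  | nil => exact hx
  | cons p ps ih =>
    rw [List.foldl_cons]
    by_cases h : (PySem.Set.contains c p.1 && !(PySem.Set.contains c p.2)) = true
    · simp only [pvPassF, h, if_pos]
      exact ih _ _ ((PySem.Set.mem_add c p.2 x).mpr (Or.inl hx))
    · have h' : (PySem.Set.contains c p.1 && !(PySem.Set.contains c p.2)) = false :=
        Bool.eq_false_iff.mpr h
      simp only [pvPassF, h', Bool.false_eq_true, if_false]
      exact ih _ _ hx

-- every element of a pass's result was in comp or is some pair's destination
theorem pv_passF_src (l : List (Int × Int)) (c : PySem.Set Int) (fl : Bool) (x : Int)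
    (hx : x ∈ (l.foldl pvPassF (c, fl)).1) : x ∈ c ∨ x ∈ l.map Prod.snd := by
  induction l generalizing c fl with
  | nil => exact Or.inl hx
  | cons p ps ih =>
    rw [List.foldl_cons] at hx
    by_cases h : (PySem.Set.contains c p.1 && !(PySem.Set.contains c p.2)) = true
    · simp only [pvPassF, h, if_pos] at hx
      rcases ih _ _ hx with hm | hm
      · rcases (PySem.Set.mem_add c p.2 x).mp hm with hm | rfl
        · exact Or.inl hm
        · exact Or.inr (List.mem_map.mpr ⟨p, List.mem_cons_self, rfl⟩)
      · exact Or.inr (List.mem_cons_of_mem _ hm)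
    · simp only [pvPassF, h] at hx
      rcases ih _ _ hx with hm | hm
      · exact Or.inl hm
      · exact Or.inr (List.mem_cons_of_mem _ hm)


-- a pass whose flag comes back true added a genuinely new element
theorem pv_passF_true (l : List (Int × Int)) (c : PySem.Set Int) (fl : Bool)
    (h : (l.foldl pvPassF (c, fl)).2 = true) :
    fl = true ∨ ∃ x, x ∈ (l.foldl pvPassF (c, fl)).1 ∧ x ∉ c := by
  induction l generalizing c fl with
  | nil => exact Or.inl h
  | cons p ps ih =>
    rw [List.foldl_cons] at h ⊢
    by_cases hc : (PySem.Set.contains c p.1 && !(PySem.Set.contains c p.2)) = true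
    · simp only [pvPassF, hc, if_pos] at h ⊢
      refine Or.inr ⟨p.2, ?_, ?_⟩
      · exact pv_passF_subset ps _ true p.2 ((PySem.Set.mem_add c p.2 p.2).mpr (Or.inr rfl))
      · intro hmem
        have := (PySem.Set.contains_iff c p.2).mpr hmem
        rw [this] at hc
        simp at hc
    · simp only [pvPassF, hc] at h ⊢
      exact ih _ _ h


-- a changing pass strictly shrinks the measure (cited by pvClosure's decreasing_by)
theorem pv_measure_lt (pairs : List (Int × Int)) (comp : PySem.Set Int)
    (h : (pvPass pairs comp).2 = true) :
    pvMeasure pairs (pvPass pairs comp).1 < pvMeasure pairs comp := by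
  rcases pv_passF_true pairs comp false h with hfl | ⟨x, hx, hxc⟩
  · cases hfl
  have hx' : x ∈ (pvPass pairs comp).1 := hx
  have hximp : ∀ y ∈ comp, y ∈ (pvPass pairs comp).1 := fun y hy =>
    pv_passF_subset pairs comp false y hy
  have hpq : ∀ d,
      (!(PySem.Set.contains (pvPass pairs comp).1 d)) = true →
        (!(PySem.Set.contains comp d)) = true := by
    intro d hd
    cases hcc : PySem.Set.contains comp d
    · rfl
    · exfalso
      have : PySem.Set.contains (pvPass pairs comp).1 d = true :=
        (PySem.Set.contains_iff _ d).mpr (hximp d ((PySem.Set.contains_iff comp d).mp hcc))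
      rw [this] at hd
      cases hd
  have hsub : List.Sublist
      ((PySem.List.dedup (pairs.map Prod.snd)).filter
        (fun d => !(PySem.Set.contains (pvPass pairs comp).1 d)))
      ((PySem.List.dedup (pairs.map Prod.snd)).filter
        (fun d => !(PySem.Set.contains comp d))) :=
    List.monotone_filter_right _ hpq
  have hxd : x ∈ PySem.List.dedup (pairs.map Prod.snd) := by
    rcases pv_passF_src pairs comp false x hx with hm | hm
    · exact absurd hm hxc
    · rw [PySem.List.dedup_eq_ofList]; exact (PySem.Set.mem_ofList _ _).mpr hm
  have hxq : x ∈ (PySem.List.dedup (pairs.map Prod.snd)).filter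
      (fun d => !(PySem.Set.contains comp d)) := by
    apply List.mem_filter.mpr
    refine ⟨hxd, ?_⟩
    cases hcc : PySem.Set.contains comp x
    · rfl
    · exact absurd ((PySem.Set.contains_iff comp x).mp hcc) hxc
  have hxnp : x ∉ (PySem.List.dedup (pairs.map Prod.snd)).filter
      (fun d => !(PySem.Set.contains (pvPass pairs comp).1 d)) := by
    intro hmem
    have := (List.mem_filter.mp hmem).2
    rw [(PySem.Set.contains_iff _ x).mpr hx'] at this
    cases this
  unfold pvMeasure
  refine Nat.lt_of_le_of_ne hsub.length_le ?_
  intro heq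
  rw [hsub.eq_of_length heq] at hxnp
  exact hxnp hxq

-- closure's while-changed loop: saturate comp under the edge relation
def pvClosure (pairs : List (Int × Int)) (comp : PySem.Set Int) : PySem.Set Int :=
  let st := pvPass pairs comp
  if h : st.2 = true then pvClosure pairs st.1 else st.1
  termination_by pvMeasure pairs comp
  decreasing_by exact pv_measure_lt pairs comp h

def solution_alt (edges : List (List Int)) : List Int :=
  let pairs := pvPairs edges
  let outdeg := PySem.Dict.counter (pairs.map (fun p => p.1))
  let indeg := PySem.Dict.counter (pairs.map (fun p => p.2))
  let nodes := PySem.List.dedup (pairs.flatMap (fun p => [p.1, p.2]))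
  let created :=
    (nodes.find? (fun n => decide (2 ≤ outdeg.getD n 0) && (indeg.getD n 0 == 0))).getD 0
  let starts := PySem.List.dedup ((pairs.filter (fun p => p.1 == created)).map (fun p => p.2))
  let r := starts.foldl
    (fun (acc : Int × Int × Int) start =>
      let comp := pvClosure pairs (PySem.Set.add PySem.Set.empty start)
      let cnt : Int := ((pairs.filter (fun p => PySem.Set.contains comp p.1)).length : Int)
      if cnt = (comp.length : Int) then (acc.1 + 1, acc.2.1, acc.2.2)
      else if cnt = (comp.length : Int) - 1 then (acc.1, acc.2.1 + 1, acc.2.2)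
      else (acc.1, acc.2.1, acc.2.2 + 1))
    (0, 0, 0)
  [created, r.1, r.2.1, r.2.2]

-- ===== PRECONDITION & SPEC =====

-- Pre_ excludes (a) edge rows that do not have exactly 2 entries, on which A raises
-- ValueError while unpacking, and (b) inputs with more than one candidate start node
-- (out-degree >= 2, in-degree == 0), on which A's pick depends on Python set iteration
-- order (not modelled).
def Pre_solution (edges : List (List Int)) : Prop :=
  (∀ e ∈ edges, e.length = 2) ∧
  ((PySem.List.dedup (edges.flatMap (fun e => [e.getD 0 0, e.getD 1 0]))).filter
      (fun n => decide (2 ≤ (edges.map (fun e => e.getD 0 0)).count n) &&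
                ((edges.map (fun e => e.getD 1 0)).count n == 0))).length ≤ 1
instance (edges : List (List Int)) : Decidable (Pre_solution edges) := by
  unfold Pre_solution; infer_instance

def pvWitness_solution : List (List Int) := [[2, 3], [3, 2], [1, 2], [1, 4]]

def Spec_solution (edges : List (List Int)) (out : List Int) : Prop := out = solution_alt edges
instance (edges : List (List Int)) (out : List Int) : Decidable (Spec_solution edges out) := by
  unfold Spec_solution; infer_instance

-- ===== CLAIM (what is proved, stated in full; the proofs are below) =====
def Claim_equal_solution : Prop :=
  ∀ (edges : List (List Int)), Dom_solution edges → Pre_solution edges →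
    Spec_solution edges (solution edges)

-- ===== LEMMAS AND PROOFS =====

-- ---------- build phase ----------

-- the adjacency dict both A and the proofs reason about
def pvAdj (pairs : List (Int × Int)) : PySem.Dict Int (List Int) :=
  pairs.foldl (fun d p => d.modify p.1 [] (fun l => l ++ [p.2])) ⟨[]⟩

theorem pv_adj_getD (pairs : List (Int × Int)) (c : Int) :
    (pvAdj pairs).getD c [] = (pairs.filter (fun p => p.1 == c)).map (fun p => p.2) := by
  unfold pvAdj
  rw [PySem.Dict.getD_foldl_modify_append]
  rfl

theorem pv_len2 (e : List Int) (h : e.length = 2) :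
    e = [PySem.List.pyGetD e 0 0, PySem.List.pyGetD e 1 0] := by
  match e, h with
  | [a, b], _ => rfl

theorem pv_buildA_fold (edges : List (List Int)) (h2 : ∀ e ∈ edges, e.length = 2)
    (g : PySem.Dict Int (List Int)) (ind outd : PySem.Dict Int Int) (ns : PySem.Set Int) :
    edges.foldl
      (fun st e =>
        match e with
        | [src, dest] =>
          (st.1.modify src [] (fun l => l ++ [dest]),
           st.2.1.modify dest 0 (fun x => x + 1),
           st.2.2.1.modify src 0 (fun x => x + 1),
           PySem.Set.add (PySem.Set.add st.2.2.2 src) dest)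
        | _ => st) (g, ind, outd, ns)
    = ((pvPairs edges).foldl (fun d p => d.modify p.1 [] (fun l => l ++ [p.2])) g,
       (pvPairs edges).foldl (fun d p => d.modify p.2 0 (fun x => x + 1)) ind,
       (pvPairs edges).foldl (fun d p => d.modify p.1 0 (fun x => x + 1)) outd,
       (pvPairs edges).foldl (fun s p => PySem.Set.add (PySem.Set.add s p.1) p.2) ns) := by
  induction edges generalizing g ind outd ns with
  | nil => rfl
  | cons e es ih =>
    have he : e = [PySem.List.pyGetD e 0 0, PySem.List.pyGetD e 1 0] :=
      pv_len2 e (h2 e (List.mem_cons_self))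
    have h2' : ∀ e' ∈ es, e'.length = 2 := fun e' he' => h2 e' (List.mem_cons_of_mem _ he')
    rw [List.foldl_cons]
    conv_lhs => rw [he]
    rw [ih h2']
    rfl

theorem pv_buildA_eq (edges : List (List Int)) (h2 : ∀ e ∈ edges, e.length = 2) :
    pvBuildA edges
      = (pvAdj (pvPairs edges),
         (pvPairs edges).foldl (fun d p => d.modify p.2 0 (fun x => x + 1)) ⟨[]⟩,
         (pvPairs edges).foldl (fun d p => d.modify p.1 0 (fun x => x + 1)) ⟨[]⟩,
         (pvPairs edges).foldl (fun s p => PySem.Set.add (PySem.Set.add s p.1) p.2)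
           PySem.Set.empty) := by
  unfold pvBuildA pvAdj
  exact pv_buildA_fold edges h2 ⟨[]⟩ ⟨[]⟩ ⟨[]⟩ PySem.Set.empty

theorem pv_deg_eq (pairs : List (Int × Int)) (f : Int × Int → Int) (n : Int) :
    ((pairs.foldl (fun d p => d.modify (f p) 0 (fun x => x + 1)) (⟨[]⟩ : PySem.Dict Int Int)).getD n 0)
      = (PySem.Dict.counter (pairs.map f)).getD n 0 := by
  have h := PySem.Dict.getD_foldl_modify_add_one (pairs.map f) (⟨[]⟩ : PySem.Dict Int Int) n
  rw [List.foldl_map] at h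
  rw [h, PySem.Dict.getD_counter]
  have h0 : (⟨[]⟩ : PySem.Dict Int Int).getD n 0 = 0 := rfl
  rw [h0]
  omega

theorem pv_nodes_eq (pairs : List (Int × Int)) :
    pairs.foldl (fun s p => PySem.Set.add (PySem.Set.add s p.1) p.2) PySem.Set.empty
      = PySem.List.dedup (pairs.flatMap (fun p => [p.1, p.2])) := by
  rw [PySem.List.dedup_eq_ofList]
  have : ∀ (s : PySem.Set Int),
      pairs.foldl (fun s p => PySem.Set.add (PySem.Set.add s p.1) p.2) s
        = (pairs.flatMap (fun p => [p.1, p.2])).foldl PySem.Set.add s := by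
    induction pairs with
    | nil => intro s; rfl
    | cons p ps ih => intro s; simp only [List.foldl_cons, List.flatMap_cons]; exact ih _
  rw [this PySem.Set.empty]
  rfl

-- ---------- reachability ----------

def pvStep (g : PySem.Dict Int (List Int)) (a b : Int) : Prop := b ∈ g.getD a []

def pvReach (g : PySem.Dict Int (List Int)) (s x : Int) : Prop :=
  Relation.ReflTransGen (pvStep g) s x

theorem pv_sum_filter_split_int (l : List Int) (a : Int) (p : Int → Bool) (f : Int → Int)
    (hl : l.Nodup) (ha : a ∈ l) (hp : p a = true) :
    ((l.filter p).map f).sum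
      = f a + ((l.filter (fun x => p x && !(x == a))).map f).sum := by
  induction l with
  | nil => cases ha
  | cons x t ih =>
    rcases List.nodup_cons.mp hl with ⟨hxt, hnt⟩
    rcases List.mem_cons.mp ha with h | hat
    · subst h
      have h1 : t.filter (fun y => p y && !(y == a)) = t.filter p := by
        apply List.filter_congr
        intro y hy
        have hy' : (y == a) = false := by
          simp only [beq_eq_false_iff_ne]
          rintro rfl; exact hxt hy
        simp [hy']
      simp [hp]
      rw [h1]
    · have hxa : (x == a) = false := by
        simp only [beq_eq_false_iff_ne]
        rintro rfl; exact hxt hat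
      by_cases hpx : p x = true
      · simp [hpx, hxa]
        rw [ih hnt hat]
        ring
      · have hpx' : p x = false := by revert hpx; cases p x <;> simp
        simp [hpx', ih hnt hat]

theorem pv_detectA_grow (g : PySem.Dict Int (List Int)) (W : List Int) (comp : PySem.Set Int)
    (count : Int) (x : Int) (hx : x ∈ comp ∨ x ∈ W) : x ∈ (pvDetectA g W comp count).1 := by
  revert hx
  fun_induction pvDetectA g W comp count with
  | case1 comp count =>
    rintro (h | h)
    · exact h
    · cases h
  | case2 node rest comp count h ih =>
    rintro (hx | hx)
    · exact ih (Or.inl hx)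
    · rcases List.mem_cons.mp hx with rfl | hx
      · exact ih (Or.inl h)
      · exact ih (Or.inr hx)
  | case3 node rest comp count h ih =>
    rintro (hx | hx)
    · exact ih (Or.inl ((PySem.Set.mem_add comp node x).mpr (Or.inl hx)))
    · rcases List.mem_cons.mp hx with rfl | hx
      · exact ih (Or.inl ((PySem.Set.mem_add comp x x).mpr (Or.inr rfl)))
      · exact ih (Or.inr (List.mem_append_left _ hx))

theorem pv_detectA_sound (g : PySem.Dict Int (List Int)) (W : List Int) (comp : PySem.Set Int)
    (count : Int) (P : Int → Prop) (hW : ∀ w ∈ W, P w) (hC : ∀ c ∈ comp, P c)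
    (hcl : ∀ a b, P a → pvStep g a b → P b) :
    ∀ x ∈ (pvDetectA g W comp count).1, P x := by
  revert hW hC
  fun_induction pvDetectA g W comp count with
  | case1 comp count =>
    intro hW hC x hx
    exact hC x hx
  | case2 node rest comp count h ih =>
    intro hW hC
    exact ih (fun w hw => hW w (List.mem_cons_of_mem _ hw)) hC
  | case3 node rest comp count h ih =>
    intro hW hC
    refine ih ?_ ?_
    · intro w hw
      rcases List.mem_append.mp hw with hw | hw
      · exact hW w (List.mem_cons_of_mem _ hw)
      · exact hcl node w (hW node List.mem_cons_self) hw
    · intro c hc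
      rcases (PySem.Set.mem_add comp node c).mp hc with hc | rfl
      · exact hC c hc
      · exact hW c List.mem_cons_self

theorem pv_detectA_closed (g : PySem.Dict Int (List Int)) (W : List Int) (comp : PySem.Set Int)
    (count : Int) (hI : ∀ c ∈ comp, ∀ n, pvStep g c n → (n ∈ comp ∨ n ∈ W)) :
    ∀ c ∈ (pvDetectA g W comp count).1, ∀ n, pvStep g c n → n ∈ (pvDetectA g W comp count).1 := by
  revert hI
  fun_induction pvDetectA g W comp count with
  | case1 comp count =>
    intro hI c hc n hn
    rcases hI c hc n hn with h | h
    · exact h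
    · cases h
  | case2 node rest comp count h ih =>
    intro hI
    refine ih ?_
    intro c hc n hn
    rcases hI c hc n hn with hm | hm
    · exact Or.inl hm
    · rcases List.mem_cons.mp hm with rfl | hm
      · exact Or.inl h
      · exact Or.inr hm
  | case3 node rest comp count h ih =>
    intro hI
    refine ih ?_
    intro c hc n hn
    rcases (PySem.Set.mem_add comp node c).mp hc with hc | rfl
    · rcases hI c hc n hn with hm | hm
      · exact Or.inl ((PySem.Set.mem_add comp node n).mpr (Or.inl hm))
      · rcases List.mem_cons.mp hm with rfl | hm
        · exact Or.inl ((PySem.Set.mem_add comp n n).mpr (Or.inr rfl))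
        · exact Or.inr (List.mem_append_left _ hm)
    · exact Or.inr (List.mem_append_right _ hn)

theorem pv_detectA_nodup (g : PySem.Dict Int (List Int)) (W : List Int) (comp : PySem.Set Int)
    (count : Int) (h : comp.Nodup) : (pvDetectA g W comp count).1.Nodup := by
  revert h
  fun_induction pvDetectA g W comp count with
  | case1 comp count => exact fun h => h
  | case2 node rest comp count h ih => exact ih
  | case3 node rest comp count h ih =>
    intro hnd
    exact ih (PySem.Set.nodup_add comp node hnd)

theorem pv_detectA_count (g : PySem.Dict Int (List Int)) (W : List Int) (comp : PySem.Set Int)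
    (count : Int) (h : comp.Nodup) :
    (pvDetectA g W comp count).2
      = count + (((pvDetectA g W comp count).1.filter
          (fun x => !(PySem.Set.contains comp x))).map
          (fun n => ((g.getD n []).length : Int))).sum := by
  revert h
  fun_induction pvDetectA g W comp count with
  | case1 comp count =>
    intro h
    have hf : comp.filter (fun x => !(PySem.Set.contains comp x)) = [] := by
      apply List.filter_eq_nil_iff.mpr
      intro a ha
      rw [(PySem.Set.contains_iff comp a).mpr ha]
      simp
    rw [hf]
    simp
  | case2 node rest comp count h ih => exact ih
  | case3 node rest comp count h ih =>
    intro hnd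
    have hnd' := PySem.Set.nodup_add comp node hnd
    have hres := ih hnd'
    have hmem : node ∈ (pvDetectA g (rest ++ g.getD node []) (PySem.Set.add comp node)
        (count + ((g.getD node []).length : Int))).1 :=
      pv_detectA_grow g _ _ _ node (Or.inl ((PySem.Set.mem_add comp node node).mpr (Or.inr rfl)))
    have hresnd : (pvDetectA g (rest ++ g.getD node []) (PySem.Set.add comp node)
        (count + ((g.getD node []).length : Int))).1.Nodup :=
      pv_detectA_nodup g _ _ _ hnd'
    have hfilter : ((pvDetectA g (rest ++ g.getD node []) (PySem.Set.add comp node)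
          (count + ((g.getD node []).length : Int))).1.filter
          (fun x => !(PySem.Set.contains (PySem.Set.add comp node) x)))
        = ((pvDetectA g (rest ++ g.getD node []) (PySem.Set.add comp node)
          (count + ((g.getD node []).length : Int))).1.filter
          (fun x => (!(PySem.Set.contains comp x)) && !(x == node))) := by
      apply List.filter_congr
      intro k _
      rw [pv_contains_add]
      cases PySem.Set.contains comp k <;> cases hk : (k == node) <;> simp
    have hpnode : (!(PySem.Set.contains comp node)) = true := by
      cases hcc : PySem.Set.contains comp node
      · rfl
      · exact absurd ((PySem.Set.contains_iff comp node).mp hcc) h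
    have hsplit := pv_sum_filter_split_int
      (pvDetectA g (rest ++ g.getD node []) (PySem.Set.add comp node)
        (count + ((g.getD node []).length : Int))).1
      node (fun x => !(PySem.Set.contains comp x))
      (fun n => ((g.getD n []).length : Int)) hresnd hmem hpnode
    rw [hres, hfilter]
    simp only [] at hsplit
    omega

theorem pv_detectA_mem (g : PySem.Dict Int (List Int)) (start x : Int) :
    x ∈ (pvDetectA g [start] PySem.Set.empty 0).1 ↔ pvReach g start x := by
  constructor
  · intro hx
    refine pv_detectA_sound g [start] PySem.Set.empty 0 (pvReach g start) ?_ ?_ ?_ x hx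
    · intro w hw
      rcases List.mem_singleton.mp hw with rfl
      exact Relation.ReflTransGen.refl
    · intro c hc; cases hc
    · intro a b ha hs; exact Relation.ReflTransGen.tail ha hs
  · intro hx
    induction hx with
    | refl => exact pv_detectA_grow g [start] PySem.Set.empty 0 start (Or.inr (by simp))
    | tail _ hs ih =>
      exact pv_detectA_closed g [start] PySem.Set.empty 0 (fun c hc => by cases hc) _ ih _ hs

-- ---------- saturation ----------

-- a pass whose flag comes back false changed nothing and found comp closed
theorem pv_passF_false (l : List (Int × Int)) (c : PySem.Set Int) (fl : Bool)
    (h : (l.foldl pvPassF (c, fl)).2 = false) :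
    (l.foldl pvPassF (c, fl)).1 = c ∧
      ∀ p ∈ l, p.1 ∈ c → p.2 ∈ c := by
  induction l generalizing c fl with
  | nil => exact ⟨rfl, by intro p hp; cases hp⟩
  | cons p ps ih =>
    rw [List.foldl_cons] at h ⊢
    by_cases hc : (PySem.Set.contains c p.1 && !(PySem.Set.contains c p.2)) = true
    · exfalso
      simp only [pvPassF, hc, if_pos] at h
      -- flag true persists: derive a contradiction by showing the flag stays true
      have : ∀ (l' : List (Int × Int)) (c' : PySem.Set Int),
          (l'.foldl pvPassF (c', true)).2 = true := by
        intro l'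
        induction l' with
        | nil => intro c'; rfl
        | cons q qs ihq =>
          intro c'
          rw [List.foldl_cons]
          by_cases hq : (PySem.Set.contains c' q.1 && !(PySem.Set.contains c' q.2)) = true
          · simp only [pvPassF, hq, if_pos]; exact ihq _
          · simp only [pvPassF, hq]; exact ihq _
      rw [this ps (PySem.Set.add c p.2)] at h
      cases h
    · simp only [pvPassF, hc] at h ⊢
      obtain ⟨h1, h2⟩ := ih _ _ h
      refine ⟨h1, ?_⟩
      intro q hq hq1
      rcases List.mem_cons.mp hq with rfl | hq
      · by_contra hq2
        apply hc
        rw [(PySem.Set.contains_iff c q.1).mpr hq1]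
        have : PySem.Set.contains c q.2 = false := by
          cases hcc : PySem.Set.contains c q.2
          · rfl
          · exact absurd ((PySem.Set.contains_iff c q.2).mp hcc) hq2
        rw [this]; rfl
      · exact h2 q hq hq1

-- a pass keeps comp duplicate-free
theorem pv_passF_nodup (l : List (Int × Int)) (c : PySem.Set Int) (fl : Bool)
    (h : c.Nodup) : (l.foldl pvPassF (c, fl)).1.Nodup := by
  induction l generalizing c fl with
  | nil => exact h
  | cons p ps ih =>
    rw [List.foldl_cons]
    by_cases hc : (PySem.Set.contains c p.1 && !(PySem.Set.contains c p.2)) = true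
    · simp only [pvPassF, hc, if_pos]
      exact ih _ _ (PySem.Set.nodup_add c p.2 h)
    · simp only [pvPassF, hc]
      exact ih _ _ h


theorem pv_passF_sound (l : List (Int × Int)) (c : PySem.Set Int) (fl : Bool)
    (P : Int → Prop) (hC : ∀ x ∈ c, P x) (hcl : ∀ p ∈ l, P p.1 → P p.2) :
    ∀ x ∈ (l.foldl pvPassF (c, fl)).1, P x := by
  induction l generalizing c fl with
  | nil => exact hC
  | cons p ps ih =>
    rw [List.foldl_cons]
    by_cases h : (PySem.Set.contains c p.1 && !(PySem.Set.contains c p.2)) = true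
    · simp only [pvPassF, h, if_pos]
      refine ih _ _ ?_ (fun q hq => hcl q (List.mem_cons_of_mem _ hq))
      intro x hx
      rcases (PySem.Set.mem_add c p.2 x).mp hx with hx | rfl
      · exact hC x hx
      · have h1 : PySem.Set.contains c p.1 = true := by
          cases hcc : PySem.Set.contains c p.1
          · rw [hcc] at h; cases h
          · rfl
        exact hcl p List.mem_cons_self (hC p.1 ((PySem.Set.contains_iff c p.1).mp h1))
    · have h' : (PySem.Set.contains c p.1 && !(PySem.Set.contains c p.2)) = false :=
        Bool.eq_false_iff.mpr h
      simp only [pvPassF, h', Bool.false_eq_true, if_false]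
      exact ih _ _ hC (fun q hq => hcl q (List.mem_cons_of_mem _ hq))

theorem pv_closure_grow (pairs : List (Int × Int)) (comp : PySem.Set Int) (x : Int)
    (hx : x ∈ comp) : x ∈ pvClosure pairs comp := by
  fun_induction pvClosure pairs comp with
  | case1 comp st h ih => exact ih (pv_passF_subset pairs comp false x hx)
  | case2 comp st h => exact pv_passF_subset pairs comp false x hx

theorem pv_closure_sound (pairs : List (Int × Int)) (comp : PySem.Set Int)
    (P : Int → Prop) (hC : ∀ x ∈ comp, P x) (hcl : ∀ p ∈ pairs, P p.1 → P p.2) :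
    ∀ x ∈ pvClosure pairs comp, P x := by
  revert hC
  fun_induction pvClosure pairs comp with
  | case1 comp st h ih =>
    intro hC
    exact ih (pv_passF_sound pairs comp false P hC hcl)
  | case2 comp st h =>
    intro hC
    exact pv_passF_sound pairs comp false P hC hcl

theorem pv_closure_closed (pairs : List (Int × Int)) (comp : PySem.Set Int) :
    ∀ p ∈ pairs, p.1 ∈ pvClosure pairs comp → p.2 ∈ pvClosure pairs comp := by
  fun_induction pvClosure pairs comp with
  | case1 comp st h ih => exact ih
  | case2 comp st h =>
    have h' : (pvPass pairs comp).2 = false := Bool.eq_false_iff.mpr h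
    obtain ⟨h1, h2⟩ := pv_passF_false pairs comp false h'
    intro p hp hp1
    have : (pvPass pairs comp).1 = comp := h1
    rw [this] at hp1 ⊢
    exact h2 p hp hp1

theorem pv_closure_nodup (pairs : List (Int × Int)) (comp : PySem.Set Int)
    (h : comp.Nodup) : (pvClosure pairs comp).Nodup := by
  revert h
  fun_induction pvClosure pairs comp with
  | case1 comp st h ih => exact fun hnd => ih (pv_passF_nodup pairs comp false hnd)
  | case2 comp st h => exact fun hnd => pv_passF_nodup pairs comp false hnd

theorem pv_closure_mem (pairs : List (Int × Int)) (start x : Int) :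
    x ∈ pvClosure pairs (PySem.Set.add PySem.Set.empty start)
      ↔ pvReach (pvAdj pairs) start x := by
  constructor
  · intro hx
    refine pv_closure_sound pairs _ (pvReach (pvAdj pairs) start) ?_ ?_ x hx
    · intro y hy
      rcases (PySem.Set.mem_add PySem.Set.empty start y).mp hy with hy | rfl
      · cases hy
      · exact Relation.ReflTransGen.refl
    · intro p hp hp1
      refine Relation.ReflTransGen.tail hp1 ?_
      show p.2 ∈ (pvAdj pairs).getD p.1 []
      rw [pv_adj_getD]
      exact List.mem_map.mpr ⟨p, List.mem_filter.mpr ⟨hp, beq_self_eq_true _⟩, rfl⟩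
  · intro hx
    induction hx with
    | refl =>
      exact pv_closure_grow pairs _ start
        ((PySem.Set.mem_add PySem.Set.empty start start).mpr (Or.inr rfl))
    | @tail b c _ hs ih =>
      have hc : c ∈ (pvAdj pairs).getD b [] := hs
      rw [pv_adj_getD] at hc
      rcases List.mem_map.mp hc with ⟨p, hpf, hp2⟩
      rcases List.mem_filter.mp hpf with ⟨hp, hpb⟩
      have hp1 : p.1 = b := beq_iff_eq.mp hpb
      subst hp2
      exact pv_closure_closed pairs _ p hp (hp1 ▸ ih)

theorem pv_comp_perm (pairs : List (Int × Int)) (start : Int) :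
    (pvDetectA (pvAdj pairs) [start] PySem.Set.empty 0).1.Perm
      (pvClosure pairs (PySem.Set.add PySem.Set.empty start)) := by
  apply (List.perm_ext_iff_of_nodup
    (pv_detectA_nodup (pvAdj pairs) [start] PySem.Set.empty 0 List.nodup_nil)
    (pv_closure_nodup pairs _ (PySem.Set.nodup_add PySem.Set.empty start List.nodup_nil))).mpr
  intro x
  rw [pv_detectA_mem, pv_closure_mem]

-- ---------- edge counting ----------

theorem pv_sum_ind_zero (C : List Int) (a : Int) (ha : a ∉ C) :
    (C.map (fun n => if (a == n) then (1 : Int) else 0)).sum = 0 := by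
  induction C with
  | nil => rfl
  | cons n t ih =>
    have hna : ¬ a = n := by
      rintro rfl; exact ha List.mem_cons_self
    simpa [hna] using ih (fun h => ha (List.mem_cons_of_mem _ h))

theorem pv_sum_ind (C : List Int) (a : Int) (hnd : C.Nodup) :
    (C.map (fun n => if (a == n) then (1 : Int) else 0)).sum
      = if PySem.Set.contains C a then (1 : Int) else 0 := by
  induction C with
  | nil => rfl
  | cons n t ih =>
    rcases List.nodup_cons.mp hnd with ⟨hnt, htn⟩
    by_cases h : a = n
    · subst h
      have hcc : PySem.Set.contains (a :: t) a = true :=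
        (PySem.Set.contains_iff _ a).mpr List.mem_cons_self
      simpa [hcc] using pv_sum_ind_zero t a hnt
    · have hna : ¬ a = n := h
      have hcc : PySem.Set.contains (n :: t) a = PySem.Set.contains t a := by
        cases hc1 : PySem.Set.contains (n :: t) a
        · cases hc2 : PySem.Set.contains t a
          · rfl
          · exfalso
            have := (PySem.Set.contains_iff t a).mp hc2
            have h1 := (PySem.Set.contains_iff (n :: t) a).mpr (List.mem_cons_of_mem _ this)
            rw [hc1] at h1; cases h1
        · cases hc2 : PySem.Set.contains t a
          · exfalso
            rcases List.mem_cons.mp ((PySem.Set.contains_iff (n :: t) a).mp hc1) with rfl | hm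
            · exact h rfl
            · have h1 := (PySem.Set.contains_iff t a).mpr hm
              rw [hc2] at h1; cases h1
          · rfl
      simpa [hna, hcc] using ih htn

theorem pv_sum_counts (pairs : List (Int × Int)) (C : List Int) (hnd : C.Nodup) :
    (C.map (fun n => ((pairs.filter (fun p => p.1 == n)).length : Int))).sum
      = ((pairs.filter (fun p => PySem.Set.contains C p.1)).length : Int) := by
  induction pairs with
  | nil => simp
  | cons p ps ih =>
    have hlen : ∀ n : Int, ((((p :: ps).filter (fun q => q.1 == n)).length : Nat) : Int)
        = (if (p.1 == n) then (1 : Int) else 0)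
          + ((ps.filter (fun q => q.1 == n)).length : Int) := by
      intro n
      simp only [List.filter_cons]
      by_cases h : (p.1 == n) = true
      · rw [if_pos h, if_pos h, List.length_cons]
        push_cast
        ring
      · rw [if_neg h, if_neg h]
        ring
    calc (C.map (fun n => (((p :: ps).filter (fun q => q.1 == n)).length : Int))).sum
        = (C.map (fun n => (if (p.1 == n) then (1 : Int) else 0)
            + ((ps.filter (fun q => q.1 == n)).length : Int))).sum := by
          apply congrArg
          apply List.map_congr_left
          intro n _
          exact hlen n
      _ = (C.map (fun n => if (p.1 == n) then (1 : Int) else 0)).sum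
            + (C.map (fun n => ((ps.filter (fun q => q.1 == n)).length : Int))).sum := by
          rw [← List.sum_map_add]
      _ = (if PySem.Set.contains C p.1 then (1 : Int) else 0)
            + ((ps.filter (fun q => PySem.Set.contains C q.1)).length : Int) := by
          rw [pv_sum_ind C p.1 hnd, ih]
      _ = (((p :: ps).filter (fun q => PySem.Set.contains C q.1)).length : Int) := by
          simp only [List.filter_cons]
          by_cases h : PySem.Set.contains C p.1 = true
          · rw [if_pos h, if_pos h, List.length_cons]
            push_cast
            ring
          · rw [if_neg h, if_neg h]
            ring

theorem pv_count_eq (pairs : List (Int × Int)) (start : Int) :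
    (pvDetectA (pvAdj pairs) [start] PySem.Set.empty 0).2
      = ((pairs.filter (fun p =>
          PySem.Set.contains (pvClosure pairs (PySem.Set.add PySem.Set.empty start)) p.1)).length
         : Int) := by
  rw [pv_detectA_count (pvAdj pairs) [start] PySem.Set.empty 0 List.nodup_nil]
  have hf : ((pvDetectA (pvAdj pairs) [start] PySem.Set.empty 0).1.filter
      (fun x => !(PySem.Set.contains PySem.Set.empty x)))
      = (pvDetectA (pvAdj pairs) [start] PySem.Set.empty 0).1 := by
    apply List.filter_eq_self.mpr
    intro a _
    rfl
  rw [hf]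
  have hfun : ∀ n : Int, (((pvAdj pairs).getD n []).length : Int)
      = ((pairs.filter (fun p => p.1 == n)).length : Int) := by
    intro n
    rw [pv_adj_getD]
    simp
  have h1 : ((pvDetectA (pvAdj pairs) [start] PySem.Set.empty 0).1.map
        (fun n => (((pvAdj pairs).getD n []).length : Int))).sum
      = ((pvDetectA (pvAdj pairs) [start] PySem.Set.empty 0).1.map
        (fun n => ((pairs.filter (fun p => p.1 == n)).length : Int))).sum := by
    apply congrArg
    apply List.map_congr_left
    intro n _
    exact hfun n
  rw [h1]
  have hperm := (pv_comp_perm pairs start).map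
    (fun n => ((pairs.filter (fun p => p.1 == n)).length : Int))
  rw [hperm.sum_eq]
  rw [pv_sum_counts pairs _ (pv_closure_nodup pairs _
    (PySem.Set.nodup_add PySem.Set.empty start List.nodup_nil))]
  ring

theorem pv_len_comp_eq (pairs : List (Int × Int)) (start : Int) :
    (pvDetectA (pvAdj pairs) [start] PySem.Set.empty 0).1.length
      = (pvClosure pairs (PySem.Set.add PySem.Set.empty start)).length :=
  (pv_comp_perm pairs start).length_eq

-- ---------- outer loop ----------

theorem pv_step_eq (pairs : List (Int × Int)) (start : Int) (d b e : Int) :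
    (let dc := pvDetectA (pvAdj pairs) [start] PySem.Set.empty 0
     (d + (if dc.2 = (dc.1.length : Int) then 1 else 0),
      b + (if dc.2 = (dc.1.length : Int) - 1 then 1 else 0),
      e + (if dc.2 ≠ (dc.1.length : Int) ∧ dc.2 ≠ (dc.1.length : Int) - 1 then 1 else 0)))
    = (let comp := pvClosure pairs (PySem.Set.add PySem.Set.empty start)
       let cnt : Int := ((pairs.filter (fun p => PySem.Set.contains comp p.1)).length : Int)
       if cnt = (comp.length : Int) then (d + 1, b, e)
       else if cnt = (comp.length : Int) - 1 then (d, b + 1, e)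
       else (d, b, e + 1)) := by
  have hc := pv_count_eq pairs start
  have hl := pv_len_comp_eq pairs start
  simp only []
  rw [hc, hl]
  set L : Int := ((pvClosure pairs (PySem.Set.add PySem.Set.empty start)).length : Int) with hL
  set C : Int := ((pairs.filter (fun p =>
      PySem.Set.contains (pvClosure pairs (PySem.Set.add PySem.Set.empty start)) p.1)).length
     : Int) with hC
  by_cases h1 : C = L
  · have h2 : ¬(C = L - 1) := by omega
    have h3 : ¬(L = L - 1) := by omega
    simp [h1, h2, h3]
  · by_cases h2 : C = L - 1
    · simp [h2]
    · simp [h1, h2]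

theorem pv_filter_discard (X : List Int) (s : Int) (q : Int → Bool) (hq : q s = false) :
    (PySem.Set.discard X s).filter q = X.filter q := by
  show (X.filter (fun y => !(y == s))).filter q = X.filter q
  rw [List.filter_filter]
  apply List.filter_congr
  intro y _
  cases hy : (y == s)
  · simp
  · have : y = s := beq_iff_eq.mp hy
    subst this
    simp [hq]

theorem pv_filter_add (X : List Int) (vis : PySem.Set Int) (s : Int) :
    X.filter (fun t => !(PySem.Set.contains (PySem.Set.add vis s) t))
      = (PySem.Set.discard X s).filter (fun t => !(PySem.Set.contains vis t)) := by
  show _ = (X.filter (fun y => !(y == s))).filter (fun t => !(PySem.Set.contains vis t))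
  rw [List.filter_filter]
  apply List.filter_congr
  intro t _
  rw [pv_contains_add]
  cases PySem.Set.contains vis t <;> cases ht : (t == s) <;> simp

theorem pv_outer (pairs : List (Int × Int)) (starts : List Int) :
    ∀ (vis : PySem.Set Int) (d b e : Int),
    (starts.foldl
      (fun (acc : PySem.Set Int × Int × Int × Int) start =>
        if start ∈ acc.1 then acc
        else
          let dc := pvDetectA (pvAdj pairs) [start] PySem.Set.empty 0
          (PySem.Set.add acc.1 start,
           acc.2.1 + (if dc.2 = (dc.1.length : Int) then 1 else 0),
           acc.2.2.1 + (if dc.2 = (dc.1.length : Int) - 1 then 1 else 0),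
           acc.2.2.2 + (if dc.2 ≠ (dc.1.length : Int) ∧ dc.2 ≠ (dc.1.length : Int) - 1 then 1 else 0)))
      (vis, d, b, e)).2
    = ((PySem.Set.ofList starts).filter (fun s => !(PySem.Set.contains vis s))).foldl
        (fun (acc : Int × Int × Int) start =>
          let comp := pvClosure pairs (PySem.Set.add PySem.Set.empty start)
          let cnt : Int := ((pairs.filter (fun p => PySem.Set.contains comp p.1)).length : Int)
          if cnt = (comp.length : Int) then (acc.1 + 1, acc.2.1, acc.2.2)
          else if cnt = (comp.length : Int) - 1 then (acc.1, acc.2.1 + 1, acc.2.2)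
          else (acc.1, acc.2.1, acc.2.2 + 1))
        (d, b, e) := by
  induction starts with
  | nil => intro vis d b e; rfl
  | cons s rest ih =>
    intro vis d b e
    rw [PySem.Set.ofList_cons, List.foldl_cons]
    by_cases hs : s ∈ vis
    · have hcs : (!(PySem.Set.contains vis s)) = false := by
        rw [(PySem.Set.contains_iff vis s).mpr hs]; rfl
      rw [if_pos hs]
      have hfc : (s :: (PySem.Set.ofList rest).discard s).filter
            (fun t => !(PySem.Set.contains vis t))
          = ((PySem.Set.ofList rest).discard s).filter
            (fun t => !(PySem.Set.contains vis t)) := by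
        simp [hs]
      rw [hfc, pv_filter_discard _ s _ hcs]
      exact ih vis d b e
    · have hcs : (!(PySem.Set.contains vis s)) = true := by
        cases hcc : PySem.Set.contains vis s
        · rfl
        · exact absurd ((PySem.Set.contains_iff vis s).mp hcc) hs
      rw [if_neg hs]
      have hfc : (s :: (PySem.Set.ofList rest).discard s).filter
            (fun t => !(PySem.Set.contains vis t))
          = s :: ((PySem.Set.ofList rest).discard s).filter
            (fun t => !(PySem.Set.contains vis t)) := by
        simp [hs]
      rw [hfc, List.foldl_cons]
      have hstep := pv_step_eq pairs s d b e
      simp only [] at hstep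
      rw [← hstep]
      have htail := pv_filter_add (PySem.Set.ofList rest) vis s
      rw [← htail]
      exact ih (PySem.Set.add vis s) _ _ _

-- ===== VERDICT (by name: the statement is the Claim_ definition above) =====
theorem solution_spec : Claim_equal_solution := by
  intro edges _ hpre
  unfold Spec_solution
  obtain ⟨h2, _⟩ := hpre
  simp only [solution, solution_alt]
  rw [pv_buildA_eq edges h2]
  simp only []
  rw [pv_nodes_eq]
  have hpred :
      (fun node => decide (2 ≤ ((pvPairs edges).foldl
            (fun (d : PySem.Dict Int Int) p => d.modify p.1 0 (fun x => x + 1))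
            (⟨[]⟩ : PySem.Dict Int Int)).getD node 0)
          && (((pvPairs edges).foldl
            (fun (d : PySem.Dict Int Int) p => d.modify p.2 0 (fun x => x + 1))
            (⟨[]⟩ : PySem.Dict Int Int)).getD node 0 == 0))
        = (fun n => decide (2 ≤ (PySem.Dict.counter
            ((pvPairs edges).map (fun p => p.1))).getD n 0)
          && ((PySem.Dict.counter ((pvPairs edges).map (fun p => p.2))).getD n 0 == 0)) := by
    funext n
    rw [pv_deg_eq, pv_deg_eq]
  unfold pvFindStartA
  rw [hpred]
  have hstarts : PySem.List.dedup (((pvPairs edges).filter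
        (fun p => p.1 == (((PySem.List.dedup ((pvPairs edges).flatMap (fun p => [p.1, p.2]))).find?
          (fun n => decide (2 ≤ (PySem.Dict.counter
              ((pvPairs edges).map (fun p => p.1))).getD n 0)
            && ((PySem.Dict.counter ((pvPairs edges).map (fun p => p.2))).getD n 0 == 0))).getD 0))).map
        (fun p => p.2))
      = PySem.Set.ofList ((pvAdj (pvPairs edges)).getD
        ((((PySem.List.dedup ((pvPairs edges).flatMap (fun p => [p.1, p.2]))).find?
          (fun n => decide (2 ≤ (PySem.Dict.counter
              ((pvPairs edges).map (fun p => p.1))).getD n 0)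
            && ((PySem.Dict.counter ((pvPairs edges).map (fun p => p.2))).getD n 0 == 0))).getD 0)) []) := by
    rw [pv_adj_getD, PySem.List.dedup_eq_ofList]
  have houter := pv_outer (pvPairs edges)
    ((pvAdj (pvPairs edges)).getD
      ((((PySem.List.dedup ((pvPairs edges).flatMap (fun p => [p.1, p.2]))).find?
        (fun n => decide (2 ≤ (PySem.Dict.counter
            ((pvPairs edges).map (fun p => p.1))).getD n 0)
          && ((PySem.Dict.counter ((pvPairs edges).map (fun p => p.2))).getD n 0 == 0))).getD 0)) [])
    PySem.Set.empty 0 0 0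
  have hfilt : ∀ X : List Int,
      X.filter (fun t => !(PySem.Set.contains PySem.Set.empty t)) = X :=
    fun X => List.filter_eq_self.mpr (fun a _ => rfl)
  rw [hfilt] at houter
  rw [hstarts, houter]
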